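-- pv_equiv track=rewrite | github.com/Rafesk/Work-ZI | magmaGOST.py | NewKey
-- ===== SOURCE A (Python) =====
-- key = ["d6c31d07","632628de","ecdbae99","6ffd7bfd","c58c398b","6ae57d79","c7982ec3","cd210f3a"]
--
-- def NewKey(keyscelude):
--     k1 = 0
--     for i in range(32):
--         if(i<24):
--             keyscelude.append(key[k1])
--         else:
--             keyscelude.append(key[7-k1])
--         k1 += 1
--         if(k1==8):
--             k1 = 0
--     return keyscelude
-- ===== SOURCE B (Python) =====
-- key = ["d6c31d07","632628de","ecdbae99","6ffd7bfd","c58c398b","6ae57d79","c7982ec3","cd210f3a"]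
--
-- def NewKey(keyscelude):
--     keyscelude.extend(key * 3 + key[::-1])
--     return keyscelude
-- ===== Notes on version B (the rewrite author's own statement) =====
-- stated objective: simpler
-- what changed: Replaces the 32-iteration counter loop with per-iteration branching and wrap-around state by a single extend of the constant schedule key*3 + key[::-1].
import Mathlib
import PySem

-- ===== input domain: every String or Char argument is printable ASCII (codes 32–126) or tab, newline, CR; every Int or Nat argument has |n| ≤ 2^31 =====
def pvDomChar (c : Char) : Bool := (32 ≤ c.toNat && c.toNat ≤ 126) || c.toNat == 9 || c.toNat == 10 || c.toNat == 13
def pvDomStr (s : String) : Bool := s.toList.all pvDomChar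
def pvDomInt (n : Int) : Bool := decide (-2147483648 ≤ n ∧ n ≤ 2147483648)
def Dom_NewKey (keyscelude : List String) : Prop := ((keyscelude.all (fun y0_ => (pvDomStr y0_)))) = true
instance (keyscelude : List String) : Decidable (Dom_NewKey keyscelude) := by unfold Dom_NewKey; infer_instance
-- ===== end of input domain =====

-- ===== PORT A =====
-- Header: B replaces A's 32-step counter loop by one extend of key*3 + reversed key (objective: simpler).
-- Both Pythons mutate the passed list in place (A appends, B extends); equivalence here is about the return value.
def keyConst : List String := ["d6c31d07","632628de","ecdbae99","6ffd7bfd","c58c398b","6ae57d79","c7982ec3","cd210f3a"]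

-- literal port of A's loop: state (keyscelude, k1), branch on i<24, wrap k1 at 8
def NewKey (keyscelude : List String) : List String :=
  (List.foldl (fun (st : List String × Int) (i : Int) =>
      let acc := if i < 24 then st.1 ++ [(PySem.List.pyGet? keyConst st.2).getD ""]
                 else st.1 ++ [(PySem.List.pyGet? keyConst (7 - st.2)).getD ""]
      let k1 := st.2 + 1
      (acc, if k1 == 8 then 0 else k1))
    (keyscelude, 0) (PySem.List.pyRange 0 32 1)).1

-- ===== PORT B =====
def NewKey_alt (keyscelude : List String) : List String :=
  keyscelude ++ (keyConst ++ keyConst ++ keyConst ++ keyConst.reverse)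

-- ===== PRECONDITION & SPEC =====
def Spec_NewKey (keyscelude : List String) (out : List String) : Prop := out = NewKey_alt keyscelude
instance (keyscelude : List String) (out : List String) : Decidable (Spec_NewKey keyscelude out) := by unfold Spec_NewKey; infer_instance

-- ===== CLAIM (what is proved, stated in full; the proofs are below) =====
def Claim_equal_NewKey : Prop := ∀ (keyscelude : List String), Dom_NewKey keyscelude → Spec_NewKey keyscelude (NewKey keyscelude)

-- ===== LEMMAS AND PROOFS =====
-- A's fold only appends to the accumulator, so a prefix factors out.
theorem NewKey_prefix (l : List Int) (pre acc : List String) (k : Int) :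
    (List.foldl (fun (st : List String × Int) (i : Int) =>
      let a := if i < 24 then st.1 ++ [(PySem.List.pyGet? keyConst st.2).getD ""]
               else st.1 ++ [(PySem.List.pyGet? keyConst (7 - st.2)).getD ""]
      let k1 := st.2 + 1
      (a, if k1 == 8 then 0 else k1)) (pre ++ acc, k) l).1 =
    pre ++ (List.foldl (fun (st : List String × Int) (i : Int) =>
      let a := if i < 24 then st.1 ++ [(PySem.List.pyGet? keyConst st.2).getD ""]
               else st.1 ++ [(PySem.List.pyGet? keyConst (7 - st.2)).getD ""]
      let k1 := st.2 + 1
      (a, if k1 == 8 then 0 else k1)) (acc, k) l).1 := by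
  induction l generalizing acc k with
  | nil => rfl
  | cons i t ih =>
    simp only [List.foldl_cons]
    split_ifs <;> rw [List.append_assoc] at * <;> exact ih _ _

-- ===== VERDICT (by name: the statement is the Claim_ definition above) =====
theorem NewKey_spec : Claim_equal_NewKey := by
  intro ks _
  unfold Spec_NewKey NewKey NewKey_alt
  have h := NewKey_prefix (PySem.List.pyRange 0 32 1) ks [] 0
  simp only [List.append_nil] at h
  rw [h]
  congr 1
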